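-- pv_equiv track=rewrite | github.com/kierengill/CS480-Natural-Language-Processing | HW3/functions.py | assign_unk
-- ===== SOURCE A (Python) =====
-- import string
--
-- punct = set(string.punctuation)
--
-- noun_suffix = ["action", "age", "ance", "cy", "dom", "ee", "ence", "er", "hood", "ion", "ism", "ist", "ity", "ling", "ment", "ness", "or", "ry", "scape", "ship", "ty"]
--
-- verb_suffix = ["ate", "ify", "ise", "ize"]
--
-- adj_suffix = ["able", "ese", "ful", "i", "ian", "ible", "ic", "ish", "ive", "less", "ly", "ous"]
--
-- adv_suffix = ["ward", "wards", "wise"]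
--
-- def assign_unk(token):
--     if any(char.isdigit() for char in token):
--         return "--unk_digit--"
--     elif any(char in punct for char in token):
--         return "--unk_punct--"
--     elif any(char.isupper() for char in token):
--         return "--unk_upper--"
--     elif any(token.endswith(suffix) for suffix in noun_suffix):
--         return "--unk_noun--"
--     elif any(token.endswith(suffix) for suffix in verb_suffix):
--         return "--unk_verb--"
--     elif any(token.endswith(suffix) for suffix in adj_suffix):
--         return "--unk_adj--"
--     elif any(token.endswith(suffix) for suffix in adv_suffix):
--         return "--unk_adv--"
--     return "--unk--"
-- ===== SOURCE B (Python) =====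
-- import string
--
-- noun_suffix = ["action", "age", "ance", "cy", "dom", "ee", "ence", "er", "hood", "ion", "ism", "ist", "ity", "ling", "ment", "ness", "or", "ry", "scape", "ship", "ty"]
-- verb_suffix = ["ate", "ify", "ise", "ize"]
-- adj_suffix = ["able", "ese", "ful", "i", "ian", "ible", "ic", "ish", "ive", "less", "ly", "ous"]
-- adv_suffix = ["ward", "wards", "wise"]
--
-- # Labels indexed by class rank: smaller rank = higher priority.
-- _LABELS = ["--unk_digit--", "--unk_punct--", "--unk_upper--",
--            "--unk_noun--", "--unk_verb--", "--unk_adj--", "--unk_adv--", "--unk--"]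
--
-- _PUNCT = set(string.punctuation)
--
-- # Hash index: suffix string -> its class rank (all 40 suffixes are distinct).
-- _SUFFIX_RANK = {}
-- for _r, _sufs in ((3, noun_suffix), (4, verb_suffix), (5, adj_suffix), (6, adv_suffix)):
--     for _s in _sufs:
--         _SUFFIX_RANK[_s] = _r
-- _MAXLEN = 0
-- for _s in _SUFFIX_RANK:
--     _MAXLEN = max(_MAXLEN, len(_s))
--
--
-- def _char_rank(ch):
--     if ch.isdigit():
--         return 0
--     if ch in _PUNCT:
--         return 1
--     if ch.isupper():
--         return 2
--     return 7
--
--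
-- def assign_unk(token):
--     # rank = minimum class rank witnessed anywhere in the token
--     rank = 7
--     for ch in token:
--         rank = min(rank, _char_rank(ch))
--     if rank > 2:
--         # character classes absent: look every tail of the token up in the suffix index
--         for k in range(1, min(len(token), _MAXLEN) + 1):
--             r = _SUFFIX_RANK.get(token[len(token) - k:])
--             if r is not None:
--                 rank = min(rank, r)
--     return _LABELS[rank]
-- ===== Notes on version B (the rewrite author's own statement) =====
-- stated objective: alternative
-- what changed: B recasts A's eight-way prioritized elif cascade as rank minimization: one pass computes the minimum character-class rank (digit=0, punct=1, upper=2), and the suffix cascade is replaced by a precomputed hash index from each of the 40 suffixes to its category rank, probed once per tail length of the token (at most 6 lookups) taking the minimum rank; the answer is a table lookup labels[rank], so no per-suffix endswith scans remain.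
import Mathlib
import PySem

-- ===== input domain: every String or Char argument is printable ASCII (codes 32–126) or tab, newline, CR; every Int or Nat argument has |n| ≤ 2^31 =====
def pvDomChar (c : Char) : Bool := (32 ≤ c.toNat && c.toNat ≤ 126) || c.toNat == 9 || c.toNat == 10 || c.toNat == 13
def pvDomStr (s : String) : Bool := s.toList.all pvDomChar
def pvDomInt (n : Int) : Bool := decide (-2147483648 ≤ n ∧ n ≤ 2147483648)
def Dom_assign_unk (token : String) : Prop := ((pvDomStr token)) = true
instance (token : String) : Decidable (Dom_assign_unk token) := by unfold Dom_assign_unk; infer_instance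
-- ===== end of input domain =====

-- B recasts A's prioritized elif cascade as rank minimization: a min over per-character class
-- ranks, then a hash index suffix -> category rank probed on each tail of the token, and a
-- final table lookup labels[rank] (objective: alternative).

-- shared module constants (punct / the four suffix lists from the Python module)
def pvPunct : List Char := "!\"#$%&'()*+,-./:;<=>?@[\\]^_`{|}~".toList
def pvNoun : List String := ["action", "age", "ance", "cy", "dom", "ee", "ence", "er", "hood", "ion", "ism", "ist", "ity", "ling", "ment", "ness", "or", "ry", "scape", "ship", "ty"]
def pvVerb : List String := ["ate", "ify", "ise", "ize"]
def pvAdj : List String := ["able", "ese", "ful", "i", "ian", "ible", "ic", "ish", "ive", "less", "ly", "ous"]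
def pvAdv : List String := ["ward", "wards", "wise"]

-- ===== PORT A =====
def assign_unk (token : String) : String :=
  if token.toList.any PySem.Chars.isdigit then "--unk_digit--"
  else if token.toList.any (fun c => pvPunct.contains c) then "--unk_punct--"
  else if token.toList.any PySem.Chars.isupper then "--unk_upper--"
  else if pvNoun.any (fun suf => PySem.Str.endswith token suf) then "--unk_noun--"
  else if pvVerb.any (fun suf => PySem.Str.endswith token suf) then "--unk_verb--"
  else if pvAdj.any (fun suf => PySem.Str.endswith token suf) then "--unk_adj--"
  else if pvAdv.any (fun suf => PySem.Str.endswith token suf) then "--unk_adv--"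
  else "--unk--"

-- ===== PORT B =====
-- _LABELS, indexed by class rank
def pvLabels : List String :=
  ["--unk_digit--", "--unk_punct--", "--unk_upper--",
   "--unk_noun--", "--unk_verb--", "--unk_adj--", "--unk_adv--", "--unk--"]

-- _SUFFIX_RANK: the module-level loop inserts the 40 distinct suffixes in this order,
-- so the built dict is exactly this association list
def pvSuffixPairs : List (String × Int) :=
  pvNoun.map (fun s => (s, 3)) ++ pvVerb.map (fun s => (s, 4))
    ++ pvAdj.map (fun s => (s, 5)) ++ pvAdv.map (fun s => (s, 6))

def pvSuffixDict : PySem.Dict String Int := PySem.Dict.mk pvSuffixPairs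

-- _MAXLEN: the module-level max-accumulating loop over the dict keys
def pvMaxLen : Int :=
  (PySem.Dict.keys pvSuffixDict).foldl (fun m s => max m ((PySem.Str.len s : Int))) 0

-- _char_rank
def pvCharRank (c : Char) : Int :=
  if PySem.Chars.isdigit c then 0
  else if pvPunct.contains c then 1
  else if PySem.Chars.isupper c then 2
  else 7

def assign_unk_alt (token : String) : String :=
  -- rank = minimum character-class rank over the token
  let rank : Int := token.toList.foldl (fun r c => min r (pvCharRank c)) 7
  let rank : Int :=
    if rank > 2 then
      -- probe the suffix index with every tail of length 1 .. min(len, _MAXLEN)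
      (PySem.List.pyRange 1 (min ((PySem.Str.len token : Int)) pvMaxLen + 1) 1).foldl
        (fun r k =>
          match PySem.Dict.get? pvSuffixDict
              (PySem.Str.slice token (some ((PySem.Str.len token : Int) - k)) none) with
          | some v => min r v
          | none => r) rank
    else rank
  PySem.List.pyGetD pvLabels rank "--unk--"

-- ===== PRECONDITION & SPEC =====
def Spec_assign_unk (token : String) (out : String) : Prop := out = assign_unk_alt token
instance (token : String) (out : String) : Decidable (Spec_assign_unk token out) := by unfold Spec_assign_unk; infer_instance

-- ===== CLAIM (what is proved, stated in full; the proofs are below) =====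
def Claim_equal_assign_unk : Prop := ∀ (token : String), Dom_assign_unk token → Spec_assign_unk token (assign_unk token)

-- ===== LEMMAS AND PROOFS =====

-- the probed tail string token[len-k:], its looked-up rank h (7 when absent from the index),
-- and the probed key range — proof-side names for what assign_unk_alt computes
def pvTail (token : String) (k : Int) : String :=
  PySem.Str.slice token (some ((PySem.Str.len token : Int) - k)) none
def pvH (token : String) (k : Int) : Int :=
  (PySem.Dict.get? pvSuffixDict (pvTail token k)).getD 7
def pvKs (token : String) : List Int :=
  PySem.List.pyRange 1 (min ((PySem.Str.len token : Int)) 6 + 1) 1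

set_option maxRecDepth 8192 in
theorem pvMaxLen_eq : pvMaxLen = 6 := by decide

set_option maxRecDepth 8192 in
set_option maxHeartbeats 1000000 in
theorem pvNodupKeys : (PySem.Dict.keys pvSuffixDict).Nodup := by decide

theorem pvStrEq {s t : String} (h : s.toList = t.toList) : s = t :=
  String.toList_inj.mp h

-- PySem.Chars.slice is the list slice on code points (definitional)
theorem pvCharsSlice (cs : List Char) (a b : Option Int) :
    PySem.Chars.slice cs a b = PySem.List.slice cs a b := rfl

theorem pvLookup_iff (s : String) (v : Int) :
    PySem.Dict.get? pvSuffixDict s = some v ↔ (s, v) ∈ pvSuffixPairs := by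
  constructor
  · intro h
    exact PySem.Dict.mem_items_of_get?_eq_some pvSuffixDict h
  · intro h
    exact PySem.Dict.get?_of_mem_items pvSuffixDict h pvNodupKeys

theorem pvMemPairs_iff (s : String) (v : Int) :
    (s, v) ∈ pvSuffixPairs ↔
      (s ∈ pvNoun ∧ v = 3) ∨ (s ∈ pvVerb ∧ v = 4) ∨ (s ∈ pvAdj ∧ v = 5) ∨ (s ∈ pvAdv ∧ v = 6) := by
  simp only [pvSuffixPairs, List.mem_append, List.mem_map, Prod.ext_iff]
  constructor
  · rintro (((⟨a, ha, rfl, rfl⟩ | ⟨a, ha, rfl, rfl⟩) | ⟨a, ha, rfl, rfl⟩) | ⟨a, ha, rfl, rfl⟩) <;> tauto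
  · rintro (⟨hs, rfl⟩ | ⟨hs, rfl⟩ | ⟨hs, rfl⟩ | ⟨hs, rfl⟩) <;>
      [exact .inl (.inl (.inl ⟨s, hs, rfl, rfl⟩));
       exact .inl (.inl (.inr ⟨s, hs, rfl, rfl⟩));
       exact .inl (.inr ⟨s, hs, rfl, rfl⟩);
       exact .inr ⟨s, hs, rfl, rfl⟩]

-- h's value is determined by which suffix list the tail belongs to
theorem pvH_cases (token : String) (k : Int) :
    pvH token k =
      (if pvTail token k ∈ pvNoun then 3
       else if pvTail token k ∈ pvVerb then 4
       else if pvTail token k ∈ pvAdj then 5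
       else if pvTail token k ∈ pvAdv then 6
       else 7) := by
  unfold pvH
  split_ifs with h1 h2 h3 h4
  · rw [(pvLookup_iff _ 3).mpr ((pvMemPairs_iff _ _).mpr (.inl ⟨h1, rfl⟩))]; rfl
  · rw [(pvLookup_iff _ 4).mpr ((pvMemPairs_iff _ _).mpr (.inr (.inl ⟨h2, rfl⟩)))]; rfl
  · rw [(pvLookup_iff _ 5).mpr ((pvMemPairs_iff _ _).mpr (.inr (.inr (.inl ⟨h3, rfl⟩))))]; rfl
  · rw [(pvLookup_iff _ 6).mpr ((pvMemPairs_iff _ _).mpr (.inr (.inr (.inr ⟨h4, rfl⟩))))]; rfl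
  · cases hlk : PySem.Dict.get? pvSuffixDict (pvTail token k) with
    | none => rfl
    | some v =>
        rcases (pvMemPairs_iff _ _).mp ((pvLookup_iff _ v).mp hlk) with
          ⟨h, _⟩ | ⟨h, _⟩ | ⟨h, _⟩ | ⟨h, _⟩ <;> tauto

theorem pvH_ge (token : String) (k : Int) : 3 ≤ pvH token k := by
  rw [pvH_cases]; split_ifs <;> omega

-- character pass: the fold computes min a (class rank of the token)
set_option maxHeartbeats 1000000 in
theorem pvCharFold (cs : List Char) (a : Int) (ha : a ≤ 7) :
    cs.foldl (fun r c => min r (pvCharRank c)) a =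
      min a (if cs.any PySem.Chars.isdigit then 0
        else if cs.any (fun c => pvPunct.contains c) then 1
        else if cs.any PySem.Chars.isupper then 2 else 7) := by
  induction cs generalizing a with
  | nil => simp; omega
  | cons c cs ih =>
      simp only [List.foldl_cons, List.any_cons]
      rw [ih (min a (pvCharRank c)) (by unfold pvCharRank; split_ifs <;> omega)]
      unfold pvCharRank
      rcases Bool.eq_false_or_eq_true (PySem.Chars.isdigit c) with h1 | h1 <;>
        rcases Bool.eq_false_or_eq_true (pvPunct.contains c) with h2 | h2 <;>
        rcases Bool.eq_false_or_eq_true (PySem.Chars.isupper c) with h3 | h3 <;>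
        rcases Bool.eq_false_or_eq_true (cs.any PySem.Chars.isdigit) with hd | hd <;>
        rcases Bool.eq_false_or_eq_true (cs.any (fun x => pvPunct.contains x)) with hp | hp <;>
        rcases Bool.eq_false_or_eq_true (cs.any PySem.Chars.isupper) with hu | hu <;>
        simp only [h1, h2, h3, hd, hp, hu, Bool.or_false,
          Bool.or_true, if_true, if_false, Bool.false_eq_true] <;>
        omega

-- the match-style fold of the port is the min-fold with h
theorem pvFoldMatch (token : String) (l : List Int) (a : Int) (ha : a ≤ 7) :
    l.foldl
      (fun r k =>
        match PySem.Dict.get? pvSuffixDict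
            (PySem.Str.slice token (some ((PySem.Str.len token : Int) - k)) none) with
        | some v => min r v
        | none => r) a
    = l.foldl (fun r k => min r (pvH token k)) a := by
  induction l generalizing a with
  | nil => rfl
  | cons k l ih =>
      simp only [List.foldl_cons]
      cases hlk : PySem.Dict.get? pvSuffixDict
          (PySem.Str.slice token (some ((PySem.Str.len token : Int) - k)) none) with
      | none =>
          have hh : pvH token k = 7 := by unfold pvH pvTail; rw [hlk]; rfl
          rw [hh, min_eq_left ha]
          exact ih a ha
      | some v =>
          have hh : pvH token k = v := by unfold pvH pvTail; rw [hlk]; rfl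
          rw [hh]
          exact ih _ (le_trans (min_le_left _ _) ha)

-- min-fold toolbox
theorem pvFoldMin_const (h : Int → Int) {l : List Int} {a : Int}
    (hlb : ∀ k ∈ l, a ≤ h k) :
    l.foldl (fun r k => min r (h k)) a = a := by
  induction l with
  | nil => rfl
  | cons k l ih =>
      simp only [List.foldl_cons]
      rw [min_eq_left (hlb k (by simp))]
      exact ih fun k hk => hlb k (by simp [hk])

theorem pvFoldMin_eq (h : Int → Int) {l : List Int} {a c : Int}
    (hub : ∃ k ∈ l, h k = c) (hlb : ∀ k ∈ l, c ≤ h k) (hc : c ≤ a) :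
    l.foldl (fun r k => min r (h k)) a = c := by
  induction l generalizing a with
  | nil => simp at hub
  | cons k l ih =>
      simp only [List.foldl_cons]
      rcases hub with ⟨k', hk', hk'c⟩
      rcases List.mem_cons.mp hk' with rfl | hmem
      · rw [hk'c, min_eq_right hc]
        exact pvFoldMin_const h fun j hj => hlb j (by simp [hj])
      · exact ih ⟨k', hmem, hk'c⟩ (fun j hj => hlb j (by simp [hj]))
          (le_min hc (hlb k (by simp)))

-- a category list matches iff some probed tail lies in it
theorem pvCat_iff (token : String) (L : List String)
    (hlen : ∀ s ∈ L, 1 ≤ s.toList.length ∧ s.toList.length ≤ 6) :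
    (L.any (fun suf => PySem.Str.endswith token suf) = true) ↔
      ∃ k ∈ pvKs token, pvTail token k ∈ L := by
  have hlenEq : (PySem.Str.len token : Int) = (token.toList.length : Int) := by
    simp [PySem.Str.len_eq]
  constructor
  · intro h
    rcases List.any_eq_true.mp h with ⟨s, hs, hend⟩
    have hsuf : s.toList <:+ token.toList := by
      rw [PySem.Str.endswith_eq] at hend
      exact (PySem.Chars.endswith_iff _ _).mp hend
    rcases hsuf with ⟨t, ht⟩
    have hm := hlen s hs
    have hlen_token : token.toList.length = t.length + s.toList.length := by
      rw [← ht, List.length_append]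
    refine ⟨(s.toList.length : Int), ?_, ?_⟩
    · simp only [pvKs, PySem.List.mem_pyRange_one, hlenEq]
      omega
    · have hcast : (PySem.Str.len token : Int) - (s.toList.length : Int)
          = ((t.length : Nat) : Int) := by rw [hlenEq]; omega
      have htl : (pvTail token (s.toList.length : Int)).toList = s.toList := by
        rw [pvTail, PySem.Str.toList_slice, hcast, pvCharsSlice, PySem.List.slice_from_natCast,
          ← ht, List.drop_left]
      rw [pvStrEq htl]
      exact hs
  · rintro ⟨k, hk, hmem⟩
    simp only [pvKs, PySem.List.mem_pyRange_one, hlenEq] at hk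
    apply List.any_eq_true.mpr
    refine ⟨pvTail token k, hmem, ?_⟩
    rw [PySem.Str.endswith_eq]
    apply (PySem.Chars.endswith_iff _ _).mpr
    have h0 : (0 : Int) ≤ (PySem.Str.len token : Int) - k := by rw [hlenEq]; omega
    have hdrop : (pvTail token k).toList
        = token.toList.drop ((PySem.Str.len token : Int) - k).toNat := by
      rw [pvTail, PySem.Str.toList_slice, pvCharsSlice]
      rw [PySem.List.slice_from token.toList h0]
    rw [hdrop]
    exact List.drop_suffix _ _

-- suffix lengths of each category list (for pvCat_iff)
theorem pvLen_noun : ∀ s ∈ pvNoun, 1 ≤ s.toList.length ∧ s.toList.length ≤ 6 := by decide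
theorem pvLen_verb : ∀ s ∈ pvVerb, 1 ≤ s.toList.length ∧ s.toList.length ≤ 6 := by decide
theorem pvLen_adj : ∀ s ∈ pvAdj, 1 ≤ s.toList.length ∧ s.toList.length ≤ 6 := by decide
theorem pvLen_adv : ∀ s ∈ pvAdv, 1 ≤ s.toList.length ∧ s.toList.length ≤ 6 := by decide

-- B's value on a token with no digit/punct/upper character, by category case analysis
set_option maxHeartbeats 1000000 in
theorem pvAlt_suffix (token : String)
    (hd : token.toList.any PySem.Chars.isdigit = false)
    (hp : token.toList.any (fun c => pvPunct.contains c) = false)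
    (hu : token.toList.any PySem.Chars.isupper = false) :
    assign_unk_alt token =
      (if pvNoun.any (fun suf => PySem.Str.endswith token suf) then "--unk_noun--"
       else if pvVerb.any (fun suf => PySem.Str.endswith token suf) then "--unk_verb--"
       else if pvAdj.any (fun suf => PySem.Str.endswith token suf) then "--unk_adj--"
       else if pvAdv.any (fun suf => PySem.Str.endswith token suf) then "--unk_adv--"
       else "--unk--") := by
  simp only [assign_unk_alt]
  rw [pvCharFold _ 7 (by omega), hd, hp, hu]
  simp only [Bool.false_eq_true, if_false, pvMaxLen_eq]
  rw [if_pos (by norm_num)]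
  rw [pvFoldMatch token _ (min 7 7) (by norm_num)]
  have hmin : (min (7 : Int) 7) = 7 := by norm_num
  rw [hmin]
  have hfold : ((PySem.List.pyRange 1 (min ((PySem.Str.len token : Int)) 6 + 1) 1).foldl
        (fun r k => min r (pvH token k)) 7) =
      (if pvNoun.any (fun suf => PySem.Str.endswith token suf) then 3
       else if pvVerb.any (fun suf => PySem.Str.endswith token suf) then 4
       else if pvAdj.any (fun suf => PySem.Str.endswith token suf) then 5
       else if pvAdv.any (fun suf => PySem.Str.endswith token suf) then 6
       else 7) := by
    show ((pvKs token).foldl (fun r k => min r (pvH token k)) 7) = _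
    split_ifs with h1 h2 h3 h4
    · rcases (pvCat_iff token pvNoun pvLen_noun).mp h1 with ⟨k, hk, hmem⟩
      exact pvFoldMin_eq _ ⟨k, hk, by rw [pvH_cases, if_pos hmem]⟩
        (fun j _ => pvH_ge token j) (by norm_num)
    · rcases (pvCat_iff token pvVerb pvLen_verb).mp h2 with ⟨k, hk, hmem⟩
      refine pvFoldMin_eq _ ⟨k, hk, ?_⟩ (fun j hj => ?_) (by norm_num)
      · rw [pvH_cases, if_neg (fun hc => h1 ((pvCat_iff token pvNoun pvLen_noun).mpr ⟨k, hk, hc⟩)),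
          if_pos hmem]
      · rw [pvH_cases]
        split_ifs with c1 <;>
          first
          | exact absurd ((pvCat_iff token pvNoun pvLen_noun).mpr ⟨j, hj, c1⟩) h1
          | omega
    · rcases (pvCat_iff token pvAdj pvLen_adj).mp h3 with ⟨k, hk, hmem⟩
      refine pvFoldMin_eq _ ⟨k, hk, ?_⟩ (fun j hj => ?_) (by norm_num)
      · rw [pvH_cases, if_neg (fun hc => h1 ((pvCat_iff token pvNoun pvLen_noun).mpr ⟨k, hk, hc⟩)),
          if_neg (fun hc => h2 ((pvCat_iff token pvVerb pvLen_verb).mpr ⟨k, hk, hc⟩)),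
          if_pos hmem]
      · rw [pvH_cases]
        split_ifs with c1 c2 <;>
          first
          | exact absurd ((pvCat_iff token pvNoun pvLen_noun).mpr ⟨j, hj, c1⟩) h1
          | exact absurd ((pvCat_iff token pvVerb pvLen_verb).mpr ⟨j, hj, c2⟩) h2
          | omega
    · rcases (pvCat_iff token pvAdv pvLen_adv).mp h4 with ⟨k, hk, hmem⟩
      refine pvFoldMin_eq _ ⟨k, hk, ?_⟩ (fun j hj => ?_) (by norm_num)
      · rw [pvH_cases, if_neg (fun hc => h1 ((pvCat_iff token pvNoun pvLen_noun).mpr ⟨k, hk, hc⟩)),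
          if_neg (fun hc => h2 ((pvCat_iff token pvVerb pvLen_verb).mpr ⟨k, hk, hc⟩)),
          if_neg (fun hc => h3 ((pvCat_iff token pvAdj pvLen_adj).mpr ⟨k, hk, hc⟩)),
          if_pos hmem]
      · rw [pvH_cases]
        split_ifs with c1 c2 c3 <;>
          first
          | exact absurd ((pvCat_iff token pvNoun pvLen_noun).mpr ⟨j, hj, c1⟩) h1
          | exact absurd ((pvCat_iff token pvVerb pvLen_verb).mpr ⟨j, hj, c2⟩) h2
          | exact absurd ((pvCat_iff token pvAdj pvLen_adj).mpr ⟨j, hj, c3⟩) h3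
          | omega
    · refine pvFoldMin_const _ (fun j hj => ?_)
      rw [pvH_cases]
      split_ifs with c1 c2 c3 c4 <;>
        first
        | exact absurd ((pvCat_iff token pvNoun pvLen_noun).mpr ⟨j, hj, c1⟩) h1
        | exact absurd ((pvCat_iff token pvVerb pvLen_verb).mpr ⟨j, hj, c2⟩) h2
        | exact absurd ((pvCat_iff token pvAdj pvLen_adj).mpr ⟨j, hj, c3⟩) h3
        | exact absurd ((pvCat_iff token pvAdv pvLen_adv).mpr ⟨j, hj, c4⟩) h4
        | omega
  rw [hfold]
  split_ifs <;> decide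

-- ===== VERDICT (by name: the statement is the Claim_ definition above) =====
theorem assign_unk_spec : Claim_equal_assign_unk := by
  intro token _
  unfold Spec_assign_unk assign_unk
  by_cases hd : token.toList.any PySem.Chars.isdigit = true
  · rw [if_pos hd]
    simp only [assign_unk_alt]
    rw [pvCharFold _ 7 (by omega), hd]
    norm_num
    decide
  · rw [if_neg hd]
    rw [Bool.not_eq_true] at hd
    by_cases hp : token.toList.any (fun c => pvPunct.contains c) = true
    · rw [if_pos hp]
      simp only [assign_unk_alt]
      rw [pvCharFold _ 7 (by omega), hd, hp]
      norm_num
      decide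
    · rw [if_neg hp]
      rw [Bool.not_eq_true] at hp
      by_cases hu : token.toList.any PySem.Chars.isupper = true
      · rw [if_pos hu]
        simp only [assign_unk_alt]
        rw [pvCharFold _ 7 (by omega), hd, hp, hu]
        norm_num
        decide
      · rw [if_neg hu]
        rw [Bool.not_eq_true] at hu
        rw [pvAlt_suffix token hd hp hu]
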